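-- pv_equiv track=rewrite | github.com/JanKubiena/pp1 | 13-Test3/p1.py | f
-- ===== SOURCE A (Python) =====
-- def f(n):
--     sticks = ""
--     for i in range(n):
--         if i % 5 == 0 and i != 0:
--             sticks = sticks + "-/"
--         else:
--             sticks = sticks + "/"
--
--     return sticks
-- ===== SOURCE B (Python) =====
-- def f(n):
--     chunks = ["/" * min(5, n - i) for i in range(0, n, 5)]
--     return "-".join(chunks)
-- ===== Notes on version B (the rewrite author's own statement) =====
-- stated objective: idiomatic
-- what changed: B builds the groups of five slashes directly (one chunk per range(0,n,5) block) and joins them with '-', instead of A's per-character loop testing i % 5 on every index.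
import Mathlib
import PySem

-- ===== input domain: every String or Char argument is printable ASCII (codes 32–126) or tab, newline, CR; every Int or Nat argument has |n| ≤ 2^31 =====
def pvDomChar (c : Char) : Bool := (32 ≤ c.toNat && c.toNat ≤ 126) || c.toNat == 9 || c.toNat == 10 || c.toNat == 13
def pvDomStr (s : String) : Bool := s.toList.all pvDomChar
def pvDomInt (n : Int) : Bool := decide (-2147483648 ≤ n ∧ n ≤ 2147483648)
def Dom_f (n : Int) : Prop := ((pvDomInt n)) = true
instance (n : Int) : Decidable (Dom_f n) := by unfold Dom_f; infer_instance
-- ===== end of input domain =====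

-- B builds the five-slash chunks directly and joins them with '-' instead of A's per-character modulo test; same O(n) cost.

-- ===== PORT A =====
-- per-character loop: for i in range(n): sticks += "-/" if (i % 5 == 0 and i != 0) else "/"
def f (n : Int) : String :=
  String.ofList ((PySem.List.pyRange 0 n 1).foldl
    (fun sticks i =>
      if PySem.Int.mod i 5 = 0 ∧ i ≠ 0 then sticks ++ ['-', '/'] else sticks ++ ['/']) [])

-- ===== PORT B =====
-- chunks = ["/" * min(5, n - i) for i in range(0, n, 5)]; return "-".join(chunks)
def f_alt (n : Int) : String :=
  String.ofList (PySem.Chars.join ['-']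
    ((PySem.List.pyRange 0 n 5).map (fun i => PySem.List.pyRepeat ['/'] (min 5 (n - i)))))

-- ===== PRECONDITION & SPEC =====
def Spec_f (n : Int) (out : String) : Prop := out = f_alt n
instance (n : Int) (out : String) : Decidable (Spec_f n out) := by unfold Spec_f; infer_instance

-- ===== CLAIM (what is proved, stated in full; the proofs are below) =====
def Claim_equal_f : Prop := ∀ (n : Int), Dom_f n → Spec_f n (f n)

-- ===== LEMMAS AND PROOFS =====

-- A's loop body, accumulated over the first m characters
def gA : Nat → List Char
  | 0 => []
  | k + 1 => gA k ++ (if k % 5 = 0 ∧ k ≠ 0 then ['-', '/'] else ['/'])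

-- B's chunk list, read off the remaining length
def chunksN (m : Nat) : List (List Char) :=
  if m = 0 then [] else List.replicate (min 5 m) '/' :: chunksN (m - 5)
termination_by m
decreasing_by omega

lemma chunksN_zero : chunksN 0 = [] := by rw [chunksN]; simp
lemma chunksN_pos {m : Nat} (h : m ≠ 0) :
    chunksN m = List.replicate (min 5 m) '/' :: chunksN (m - 5) := by
  rw [chunksN]; simp [h]

-- A's fold over range(n) equals gA n.toNat
lemma foldA_eq (m : Nat) :
    (PySem.List.pyRange 0 (m : Int) 1).foldl
      (fun sticks i =>
        if PySem.Int.mod i 5 = 0 ∧ i ≠ 0 then sticks ++ ['-', '/'] else sticks ++ ['/']) []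
    = gA m := by
  induction m with
  | zero => rw [PySem.List.pyRange_one_eq_nil (by omega)]; simp [gA]
  | succ k ih =>
      have hc : ((k + 1 : Nat) : Int) = (k : Int) + 1 := by push_cast; ring
      rw [hc, PySem.List.pyRange_one_succ_right (by omega), List.foldl_append, ih]
      simp only [List.foldl_cons, List.foldl_nil, gA]
      have hmod : PySem.Int.mod (k : Int) 5 = ((k % 5 : Nat) : Int) :=
        PySem.Int.mod_natCast k 5
      by_cases h5 : k % 5 = 0 ∧ k ≠ 0
      · rw [if_pos, if_pos h5]
        exact ⟨by rw [hmod, h5.1]; rfl, by exact_mod_cast h5.2⟩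
      · rw [if_neg, if_neg h5]
        intro ⟨h1, h2⟩
        apply h5
        refine ⟨?_, ?_⟩
        · rw [hmod] at h1; exact_mod_cast h1
        · exact fun hk => h2 (by exact_mod_cast hk)

-- B's mapped range(0, n, 5) equals chunksN, counted by number of chunks q
lemma map_range_chunks (q : Nat) : ∀ m : Nat, 5 * q < m + 5 → m ≤ 5 * q →
    (List.range q).map
      (fun (k : Nat) => List.replicate (min 5 ((m : Int) - 5 * (k : Int))).toNat '/') = chunksN m := by
  induction q with
  | zero =>
      intro m _ hm
      have : m = 0 := by omega
      subst this; simp [chunksN_zero]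
  | succ q ih =>
      intro m h1 h2
      rw [List.range_succ_eq_map, List.map_cons, List.map_map]
      have hm0 : m ≠ 0 := by omega
      rw [chunksN_pos hm0]
      congr 1
      · have : (min 5 ((m : Int) - 5 * (0 : Nat))).toNat = min 5 m := by
          push_cast; omega
        rw [this]
      · by_cases h5 : 5 ≤ m
        · have := ih (m - 5) (by omega) (by omega)
          rw [← this]
          apply List.map_congr_left
          intro k _
          simp only [Function.comp]
          congr 2
          push_cast
          omega
        · have hq : q = 0 := by omega
          subst hq
          have : m - 5 = 0 := by omega
          rw [this, chunksN_zero]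
          simp

-- one step of B's join, in A's increments
lemma join_chunks_step : ∀ m : Nat,
    PySem.Chars.join ['-'] (chunksN (m + 1))
    = PySem.Chars.join ['-'] (chunksN m) ++ (if m % 5 = 0 ∧ m ≠ 0 then ['-', '/'] else ['/']) := by
  intro m
  induction m using Nat.strong_induction_on with
  | _ m ih =>
    by_cases h6 : 6 ≤ m
    · -- both chunk lists start with a full chunk followed by a nonempty tail
      have hm1 : m + 1 ≠ 0 := by omega
      have hm0 : m ≠ 0 := by omega
      have ht1 : m + 1 - 5 = (m - 5) + 1 := by omega
      have ht0 : m - 5 ≠ 0 := by omega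
      rw [chunksN_pos hm1, chunksN_pos hm0, ht1]
      have hfull1 : min 5 (m + 1) = 5 := by omega
      have hfull0 : min 5 m = 5 := by omega
      rw [hfull1, hfull0]
      rw [chunksN_pos (show (m - 5) + 1 ≠ 0 by omega), chunksN_pos ht0,
          PySem.Chars.join_cons_cons, PySem.Chars.join_cons_cons,
          ← chunksN_pos (show (m - 5) + 1 ≠ 0 by omega), ← chunksN_pos ht0]
      rw [ih (m - 5) (by omega)]
      have hcond : ((m - 5) % 5 = 0 ∧ m - 5 ≠ 0) ↔ (m % 5 = 0 ∧ m ≠ 0) := by omega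
      simp only [List.append_assoc]
      congr 2
      by_cases hc : m % 5 = 0 ∧ m ≠ 0
      · rw [if_pos (hcond.mpr hc), if_pos hc]
      · rw [if_neg (fun h => hc (hcond.mp h)), if_neg hc]
    · -- m ≤ 5: at most two chunks on the left, one (or none) on the right
      interval_cases m <;>
        simp [chunksN, PySem.Chars.join_cons_cons, PySem.Chars.join_singleton,
              PySem.Chars.join_nil, List.replicate]

-- gA is B's joined chunk list
lemma gA_eq_join (m : Nat) : gA m = PySem.Chars.join ['-'] (chunksN m) := by
  induction m with
  | zero => simp [gA, chunksN_zero, PySem.Chars.join_nil]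
  | succ k ih => rw [join_chunks_step, gA, ih]

-- ===== VERDICT (by name: the statement is the Claim_ definition above) =====
theorem f_spec : Claim_equal_f := by
  intro n _
  unfold Spec_f f f_alt
  by_cases hn : n ≤ 0
  · rw [PySem.List.pyRange_one_eq_nil hn,
        PySem.List.pyRange_of_pos 0 n (by omega : (0:Int) < 5)]
    rw [if_neg (by omega : ¬ (0:Int) < n)]
    simp [PySem.Chars.join_nil]
  · have hn' : 0 < n := by omega
    obtain ⟨m, rfl⟩ : ∃ m : Nat, n = (m : Int) := ⟨n.toNat, by omega⟩
    rw [foldA_eq, gA_eq_join]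
    congr 1
    rw [PySem.List.pyRange_of_pos 0 (m : Int) (by omega : (0:Int) < 5),
        if_pos (by exact_mod_cast hn')]
    rw [List.map_map]
    set q := (((m : Int) - 0 + 5 - 1) / 5).toNat with hq
    have hq1 : 5 * q < m + 5 := by omega
    have hq2 : m ≤ 5 * q := by omega
    rw [← map_range_chunks q m hq1 hq2]
    congr 1
    apply List.map_congr_left
    intro k _
    simp only [Function.comp]
    rw [PySem.List.pyRepeat_singleton]
    congr 1
    omega
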